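-- pv_equiv track=rewrite | github.com/jueoneom/algorithm_study | week1_extra/dmi_review/lv3.5_demi_GameItem.py | solution
-- ===== SOURCE A (Python) =====
-- from collections import deque
-- import heapq
--
-- def solution(healths, items):
--     answer =[]
--     #enumerate()함수는 인덱스를 붙여준다. *을 item 앞에 붙이면 item을 unpacking 하고 다시 packing 하게됨
--     items=[(*item, idx) for idx, item in enumerate(items, 1)]
--     BUFF, DEBUFF, INDEX = 0, 1, 2
--     items.sort(key = lambda x: x[DEBUFF])
--     items = deque(items) #items의 중복을 막기 위해서 &
--
--     #빈 리스트에는 heapify할 필요가 없음!!!!!! (중요!!)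
--     #heapify : heap 구조로 정렬하는 함수임. 원소가 없으면 필요 없다.
--     #heap 자료구조는 자료의 삽입과 삭제가 빈번하고 계속 정렬이 필요할 때 사용함
--     candidates = [] #쓸 수 있는 아이템을 담는 힙
--     answer = []
--
--     for health in healths:
--         while items and (health - items[0][DEBUFF] >= 100):
--             item = items.popleft()
--             heapq.heappush(candidates, (-item[BUFF], item[INDEX]))
--         if candidates:
--             answer.append(heapq.heappop(candidates)[1])
--
--
--     return answer
-- ===== SOURCE B (Python) =====
-- def solution(healths, items):
--     # items sorted by debuff (stable), consumed via a forward pointer; usable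
--     # pool kept as a plain list of (buff, index) scanned for the best entry.
--     order = sorted([(*it, i) for i, it in enumerate(items, 1)], key=lambda t: t[1])
--     pool = []
--     ptr = 0
--     answer = []
--     for health in healths:
--         while ptr < len(order) and health - order[ptr][1] >= 100:
--             t = order[ptr]
--             pool.append((t[0], t[2]))
--             ptr += 1
--         if pool:
--             best = pool[0]
--             for entry in pool[1:]:
--                 if entry[0] > best[0] or (entry[0] == best[0] and entry[1] < best[1]):
--                     best = entry
--             answer.append(best[1])
--             pool.remove(best)
--     return answer
-- ===== Notes on version B (the rewrite author's own statement) =====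
-- stated objective: simpler
-- what changed: Replaces the deque + heapq heap of (-buff, index) pairs by a forward pointer into the sorted list and a plain pool of (buff, index) pairs selected by a linear max-scan (highest buff, ties by smallest index) and removed with list.remove.
import Mathlib
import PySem

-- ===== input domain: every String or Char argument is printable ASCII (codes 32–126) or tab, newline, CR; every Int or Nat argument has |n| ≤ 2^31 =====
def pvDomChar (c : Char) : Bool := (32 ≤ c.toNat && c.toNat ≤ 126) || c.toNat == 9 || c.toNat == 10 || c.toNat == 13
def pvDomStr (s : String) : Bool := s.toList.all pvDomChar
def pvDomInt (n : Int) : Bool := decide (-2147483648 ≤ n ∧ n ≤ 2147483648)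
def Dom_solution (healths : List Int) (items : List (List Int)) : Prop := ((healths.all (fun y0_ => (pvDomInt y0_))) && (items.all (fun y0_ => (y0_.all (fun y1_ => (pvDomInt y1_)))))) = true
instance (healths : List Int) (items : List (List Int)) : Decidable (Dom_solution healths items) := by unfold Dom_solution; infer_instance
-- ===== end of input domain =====

-- B replaces the heap of (-buff, index) pairs by a plain pool of (buff, index)
-- pairs scanned linearly for the best entry (simpler: no heapq, no negation trick).

-- ===== PORT A =====

-- heap order: Python tuple comparison (-buff, index) < (-buff', index')
def pvLexLt (a b : Int × Int) : Bool := a.1 < b.1 || (a.1 == b.1 && a.2 < b.2)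

-- heapq.heappop ported by its contract: returns the heap minimum and the
-- remaining elements (heapq's internal array order is not observable here).
def pvPopMin : (Int × Int) → List (Int × Int) → ((Int × Int) × List (Int × Int))
  | m, [] => (m, [])
  | m, x :: xs =>
    if pvLexLt x m then
      let r := pvPopMin x xs; (r.1, m :: r.2)
    else
      let r := pvPopMin m xs; (r.1, x :: r.2)

-- the inner while loop: pop usable items off the deque, heappush (-buff, index)
def pvDrainA (health : Int) : List (Int × Int × Int) → List (Int × Int) →
    (List (Int × Int × Int) × List (Int × Int))
  | [], cand => ([], cand)
  | q :: qs, cand =>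
    if health - q.2.1 ≥ 100 then pvDrainA health qs (cand ++ [(-q.1, q.2.2)])
    else (q :: qs, cand)

-- the for loop over healths, state = (deque, candidates heap, answer)
def pvLoopA : List Int → List (Int × Int × Int) → List (Int × Int) → List Int → List Int
  | [], _, _, ans => ans
  | h :: hs, queue, cand, ans =>
    let d := pvDrainA h queue cand
    match d.2 with
    | [] => pvLoopA hs d.1 [] ans
    | m :: rest =>
      let p := pvPopMin m rest
      pvLoopA hs d.1 p.2 (ans ++ [p.1.2])

-- A's literal steps: enumerate(items, 1), build x = (*item, idx), stable sort
-- by x[1], then loop.  The tuple accesses x[0], x[1], x[2] are exact on Pre_: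
-- x[1] is item[1] (or idx for a length-1 item), x[2] is item[2] (or idx for a
-- length-2 item); the getD defaults are never read inside Pre_ otherwise.
def solution (healths : List Int) (items : List (List Int)) : List Int :=
  let its := (PySem.List.enumerate items 1).map
    (fun p => (((PySem.List.pyGet? p.2 0).getD 0),
               ((PySem.List.pyGet? p.2 1).getD p.1),
               ((PySem.List.pyGet? p.2 2).getD p.1)))
  let sortedIts := PySem.List.sorted its (fun t => t.2.1) false
  pvLoopA healths sortedIts [] []

-- ===== PORT B =====

-- B's scan step: entry beats best if larger buff, or equal buff and smaller index
def pvBetter (e b : Int × Int) : Bool := e.1 > b.1 || (e.1 == b.1 && e.2 < b.2)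

-- B's while loop: forward pointer over the sorted list, append to the pool
def pvDrainB (health : Int) (order : List (Int × Int × Int)) (ptr : Nat)
    (pool : List (Int × Int)) : Nat × List (Int × Int) :=
  if hp : ptr < order.length then
    let t := order[ptr]
    if health - t.2.1 ≥ 100 then pvDrainB health order (ptr + 1) (pool ++ [(t.1, t.2.2)])
    else (ptr, pool)
  else (ptr, pool)
  termination_by order.length - ptr

-- B's for loop, state = (pointer, pool, answer); best found by a linear scan
def pvLoopB (order : List (Int × Int × Int)) :
    List Int → Nat → List (Int × Int) → List Int → List Int
  | [], _, _, ans => ans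
  | h :: hs, ptr, pool, ans =>
    let d := pvDrainB h order ptr pool
    match d.2 with
    | [] => pvLoopB order hs d.1 [] ans
    | p0 :: pr =>
      let best := pr.foldl (fun b e => if pvBetter e b then e else b) p0
      pvLoopB order hs d.1 ((PySem.List.remove? d.2 best).getD d.2) (ans ++ [best.2])

-- B builds the same sorted (*item, idx) tuples (same exactness note as in A)
def solution_alt (healths : List Int) (items : List (List Int)) : List Int :=
  let its := (PySem.List.enumerate items 1).map
    (fun p => (((PySem.List.pyGet? p.2 0).getD 0),
               ((PySem.List.pyGet? p.2 1).getD p.1),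
               ((PySem.List.pyGet? p.2 2).getD p.1)))
  let order := PySem.List.sorted its (fun t => t.2.1) false
  pvLoopB order healths 0 [] []

-- ===== PRECONDITION & SPEC =====
-- Pre_ is exactly the inputs on which A returns: A raises IndexError when some
-- item is empty (the sort key reads item-tuple[1]) or when a length-1 item
-- becomes usable (heappush reads its missing index slot), i.e. when some
-- health reaches 100 + its 1-based position.
def Pre_solution (healths : List Int) (items : List (List Int)) : Prop :=
  (∀ it ∈ items, 1 ≤ it.length) ∧
  (∀ p ∈ PySem.List.enumerate items 1, p.2.length = 1 → ∀ h ∈ healths, h - p.1 < 100)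
instance (healths : List Int) (items : List (List Int)) : Decidable (Pre_solution healths items) := by
  unfold Pre_solution; infer_instance

def pvWitness_solution : List Int × List (List Int) := ([150, 120], [[10, 20], [10, 5]])

def Spec_solution (healths : List Int) (items : List (List Int)) (out : List Int) : Prop := out = solution_alt healths items
instance (healths : List Int) (items : List (List Int)) (out : List Int) : Decidable (Spec_solution healths items out) := by unfold Spec_solution; infer_instance

-- ===== CLAIM (what is proved, stated in full; the proofs are below) =====
def Claim_equal_solution : Prop := ∀ (healths : List Int) (items : List (List Int)), Dom_solution healths items → Pre_solution healths items → Spec_solution healths items (solution healths items)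

-- ===== LEMMAS AND PROOFS =====

-- the (-buff, index) encoding linking A's heap entries to B's pool entries
def pvF (p : Int × Int) : Int × Int := (-p.1, p.2)

-- the generic "keep the smaller (w.r.t. pvLexLt)" fold
def pvPick (c x : Int × Int) : Int × Int := if pvLexLt x c then x else c

theorem pvF_inj : Function.Injective pvF := by
  intro a b h
  simp only [pvF, Prod.mk.injEq, neg_inj] at h
  exact Prod.ext h.1 h.2

theorem pvLexLt_F (a b : Int × Int) : pvLexLt (pvF a) (pvF b) = pvBetter a b := by
  apply Bool.eq_iff_iff.mpr
  simp only [pvLexLt, pvBetter, pvF, Bool.or_eq_true, Bool.and_eq_true,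
    decide_eq_true_eq, beq_iff_eq, neg_inj, neg_lt_neg_iff, gt_iff_lt]

theorem pvLexLt_antisymm {a b : Int × Int} (h1 : pvLexLt a b = false)
    (h2 : pvLexLt b a = false) : a = b := by
  have h1' : ¬ (pvLexLt a b = true) := by simp [h1]
  have h2' : ¬ (pvLexLt b a = true) := by simp [h2]
  simp only [pvLexLt, Bool.or_eq_true, Bool.and_eq_true, decide_eq_true_eq,
    beq_iff_eq] at h1' h2'
  refine Prod.ext ?_ ?_ <;> omega

theorem pvLexLt_trans_false {a b c : Int × Int} (h1 : pvLexLt a b = false)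
    (h2 : pvLexLt b c = false) : pvLexLt a c = false := by
  have h1' : ¬ (pvLexLt a b = true) := by simp [h1]
  have h2' : ¬ (pvLexLt b c = true) := by simp [h2]
  cases h : pvLexLt a c
  · rfl
  · exfalso
    simp only [pvLexLt, Bool.or_eq_true, Bool.and_eq_true, decide_eq_true_eq,
      beq_iff_eq] at h1' h2' h
    omega

theorem pvLexLt_asymm {a b : Int × Int} (h : pvLexLt a b = true) :
    pvLexLt b a = false := by
  cases h2 : pvLexLt b a
  · rfl
  · exfalso
    simp only [pvLexLt, Bool.or_eq_true, Bool.and_eq_true, decide_eq_true_eq,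
      beq_iff_eq] at h h2
    omega

theorem pvLexLt_irrefl (a : Int × Int) : pvLexLt a a = false := by
  cases h : pvLexLt a a
  · rfl
  · exfalso
    simp only [pvLexLt, Bool.or_eq_true, Bool.and_eq_true, decide_eq_true_eq,
      beq_iff_eq] at h
    omega

-- pvPopMin's value is the pvPick fold
theorem pvPopMin_fst (m : Int × Int) (xs : List (Int × Int)) :
    (pvPopMin m xs).1 = xs.foldl pvPick m := by
  induction xs generalizing m with
  | nil => simp [pvPopMin]
  | cons x xs ih =>
    simp only [pvPopMin, List.foldl_cons, pvPick]
    split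
    · simpa using ih x
    · simpa using ih m

-- the fold picks an element of m :: xs …
theorem pvFold_mem (m : Int × Int) (xs : List (Int × Int)) :
    xs.foldl pvPick m ∈ m :: xs := by
  induction xs generalizing m with
  | nil => simp
  | cons x xs ih =>
    simp only [List.foldl_cons, pvPick]
    split
    · rcases List.mem_cons.1 (ih x) with h | h <;> simp [h]
    · rcases List.mem_cons.1 (ih m) with h | h <;> simp [h]

-- … that no element of m :: xs is pvLexLt-below
theorem pvFold_min (m : Int × Int) (xs : List (Int × Int)) :
    ∀ z ∈ m :: xs, pvLexLt z (xs.foldl pvPick m) = false := by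
  induction xs generalizing m with
  | nil =>
    intro z hz
    simp only [List.mem_singleton] at hz
    rw [hz]
    simpa using pvLexLt_irrefl m
  | cons x xs ih =>
    intro z hz
    simp only [List.foldl_cons]
    have hmm : pvLexLt m (pvPick m x) = false := by
      unfold pvPick
      split <;> rename_i hx
      · exact pvLexLt_asymm hx
      · exact pvLexLt_irrefl m
    have hxm : pvLexLt x (pvPick m x) = false := by
      unfold pvPick
      split <;> rename_i hx
      · exact pvLexLt_irrefl x
      · simpa using hx
    rcases List.mem_cons.1 hz with hzm | hz'
    · rw [hzm]
      exact pvLexLt_trans_false hmm (ih (pvPick m x) _ List.mem_cons_self)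
    · rcases List.mem_cons.1 hz' with hzx | hz''
      · rw [hzx]
        exact pvLexLt_trans_false hxm (ih (pvPick m x) _ List.mem_cons_self)
      · exact ih (pvPick m x) z (List.mem_cons_of_mem _ hz'')

-- pvPopMin leaves a permutation of the rest
theorem pvPopMin_perm (m : Int × Int) (xs : List (Int × Int)) :
    (m :: xs).Perm ((pvPopMin m xs).1 :: (pvPopMin m xs).2) := by
  induction xs generalizing m with
  | nil => simp [pvPopMin]
  | cons x xs ih =>
    simp only [pvPopMin]
    split
    · -- remove from the tail, re-cons m after the returned minimum
      simpa using (((ih x).cons m).trans (List.Perm.swap _ _ _))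
    · -- remove from the tail, re-cons x after the returned minimum
      simpa using (((List.Perm.swap x m xs).trans ((ih m).cons x)).trans (List.Perm.swap _ _ _))

-- B's scan is the pvPick fold transported through pvF
theorem pvBest_F (p0 : Int × Int) (pr : List (Int × Int)) :
    pvF (pr.foldl (fun b e => if pvBetter e b then e else b) p0) =
      (pr.map pvF).foldl pvPick (pvF p0) := by
  induction pr generalizing p0 with
  | nil => simp
  | cons x xs ih =>
    simp only [List.foldl_cons, List.map_cons, pvPick, pvLexLt_F]
    split <;> simp [ih]

-- two minima of permuted multisets coincide
theorem pvMin_unique {c : List (Int × Int)} {pool : List (Int × Int)}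
    (hperm : c.Perm (pool.map pvF)) {v : Int × Int} {b : Int × Int}
    (hv_mem : v ∈ c) (hv_min : ∀ z ∈ c, pvLexLt z v = false)
    (hb_mem : b ∈ pool) (hb_max : ∀ z ∈ pool, pvBetter z b = false) :
    v = pvF b := by
  have hvb : pvLexLt v (pvF b) = false := by
    rcases List.mem_map.1 (hperm.mem_iff.1 hv_mem) with ⟨w, hw, rfl⟩
    rw [pvLexLt_F]
    exact hb_max w hw
  have hbv : pvLexLt (pvF b) v = false :=
    hv_min _ (hperm.mem_iff.2 (List.mem_map_of_mem hb_mem))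
  exact pvLexLt_antisymm hvb hbv

-- one unfolding step of pvDrainB
theorem pvDrainB_step (h : Int) (order : List (Int × Int × Int)) (ptr : Nat)
    (pool : List (Int × Int)) :
    pvDrainB h order ptr pool =
      if hp : ptr < order.length then
        (if h - order[ptr].2.1 ≥ 100 then
          pvDrainB h order (ptr + 1) (pool ++ [(order[ptr].1, order[ptr].2.2)])
        else (ptr, pool))
      else (ptr, pool) := by
  rw [pvDrainB]

-- accumulator lemmas for the two drains
theorem pvDrainA_acc (h : Int) (q : List (Int × Int × Int)) (c : List (Int × Int)) :
    pvDrainA h q c = ((pvDrainA h q []).1, c ++ (pvDrainA h q []).2) := by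
  induction q generalizing c with
  | nil => simp [pvDrainA]
  | cons x qs ih =>
    simp only [pvDrainA]
    split
    · rw [ih, ih ([] ++ [(-x.1, x.2.2)])]; simp
    · simp

theorem pvDrainB_acc (h : Int) (order : List (Int × Int × Int)) (ptr : Nat)
    (pool : List (Int × Int)) :
    pvDrainB h order ptr pool = ((pvDrainB h order ptr []).1, pool ++ (pvDrainB h order ptr []).2) := by
  induction hn : order.length - ptr using Nat.strong_induction_on generalizing ptr pool with
  | _ n ih =>
    rw [pvDrainB_step h order ptr pool, pvDrainB_step h order ptr []]
    split
    · rename_i hp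
      split
      · rename_i hcond
        have hlt : order.length - (ptr + 1) < n := by omega
        rw [ih _ hlt _ _ rfl, ih _ hlt _ ([] ++ [(order[ptr].1, order[ptr].2.2)]) rfl]
        simp
      · simp
    · simp

-- the two drains walk the same prefix and collect pvF-related entries
theorem pvDrain_sim (h : Int) (order : List (Int × Int × Int)) :
    ∀ ptr : Nat,
      (pvDrainA h (order.drop ptr) []).1 = order.drop (pvDrainB h order ptr []).1 ∧
      (pvDrainA h (order.drop ptr) []).2 = ((pvDrainB h order ptr []).2).map pvF := by
  intro ptr
  induction hn : order.length - ptr using Nat.strong_induction_on generalizing ptr with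
  | _ n ih =>
    rw [pvDrainB_step h order ptr []]
    split
    · rename_i hp
      have hdrop : order.drop ptr = order[ptr] :: order.drop (ptr + 1) :=
        List.drop_eq_getElem_cons hp
      rw [hdrop]
      simp only [pvDrainA]
      split
      · rename_i hcond
        have hlt : order.length - (ptr + 1) < n := by omega
        have hrec := ih _ hlt (ptr + 1) rfl
        rw [pvDrainA_acc, pvDrainB_acc]
        refine ⟨hrec.1, ?_⟩
        simp [hrec.2, pvF]
      · exact ⟨hdrop.symm, rfl⟩
    · rename_i hp
      have hdrop : order.drop ptr = [] := List.drop_eq_nil_of_le (by omega)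
      rw [hdrop]
      exact ⟨rfl, rfl⟩

-- main simulation: same answers from pvF-permuted states
theorem pvLoop_sim (order : List (Int × Int × Int)) :
    ∀ (hs : List Int) (ptr : Nat) (cand : List (Int × Int)) (pool : List (Int × Int))
      (ans : List Int), (cand.Perm (pool.map pvF)) →
      pvLoopA hs (order.drop ptr) cand ans = pvLoopB order hs ptr pool ans := by
  intro hs
  induction hs with
  | nil => intro ptr cand pool ans _; simp [pvLoopA, pvLoopB]
  | cons h hs ih =>
    intro ptr cand pool ans hperm
    simp only [pvLoopA, pvLoopB]
    have hsim := pvDrain_sim h order ptr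
    rw [pvDrainA_acc, pvDrainB_acc]
    set delta := (pvDrainB h order ptr []).2 with hdelta
    set ptr2 := (pvDrainB h order ptr []).1 with hptr2
    have hq : (pvDrainA h (order.drop ptr) []).1 = order.drop ptr2 := hsim.1
    have hc : (pvDrainA h (order.drop ptr) []).2 = delta.map pvF := hsim.2
    have hperm2 : (cand ++ delta.map pvF).Perm ((pool ++ delta).map pvF) := by
      rw [List.map_append]; exact hperm.append_right _
    rw [hq, hc]
    match hpool : pool ++ delta with
    | [] =>
      have hcnil : cand ++ delta.map pvF = [] := by
        have hp0 : (cand ++ delta.map pvF).Perm ([] : List (Int × Int)) := by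
          have := hperm2
          rw [hpool] at this
          simpa using this
        exact hp0.eq_nil
      rw [hcnil]
      dsimp only
      exact ih ptr2 [] [] ans (by simp)
    | p0 :: pr =>
      have hperm3 : (cand ++ delta.map pvF).Perm ((p0 :: pr).map pvF) := by
        have := hperm2; rw [hpool] at this; exact this
      have hcne : cand ++ delta.map pvF ≠ [] := by
        intro hnil
        have := hperm3.length_eq
        simp [hnil] at this
      match hcand : cand ++ delta.map pvF with
      | [] => exact absurd hcand hcne
      | m :: rest =>
        dsimp only
        rw [hcand] at hperm3
        set b := pr.foldl (fun b e => if pvBetter e b then e else b) p0 with hb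
        have hbF : pvF b = (pr.map pvF).foldl pvPick (pvF p0) := pvBest_F p0 pr
        have hbmemF : pvF b ∈ (p0 :: pr).map pvF := by
          rw [hbF]
          simpa using pvFold_mem (pvF p0) (pr.map pvF)
        have hbmem : b ∈ p0 :: pr := by
          rcases List.mem_map.1 hbmemF with ⟨w, hw, hww⟩
          rwa [← pvF_inj hww]
        have hbmax : ∀ z ∈ p0 :: pr, pvBetter z b = false := by
          intro z hz
          rw [← pvLexLt_F, hbF]
          exact pvFold_min (pvF p0) (pr.map pvF) (pvF z)
            (by simpa using List.mem_map_of_mem (f := pvF) hz)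
        have hvmin : ∀ z ∈ m :: rest, pvLexLt z (pvPopMin m rest).1 = false := by
          intro z hz
          rw [pvPopMin_fst]
          exact pvFold_min m rest z hz
        have hvmem : (pvPopMin m rest).1 ∈ m :: rest := by
          rw [pvPopMin_fst]; exact pvFold_mem m rest
        have hv : (pvPopMin m rest).1 = pvF b :=
          pvMin_unique hperm3 hvmem hvmin hbmem hbmax
        have hremove : PySem.List.remove? (p0 :: pr) b = some ((p0 :: pr).erase b) :=
          PySem.List.remove?_eq_some_erase _ b hbmem
        rw [hremove]
        simp only [Option.getD_some]
        have hpermNext : ((pvPopMin m rest).2).Perm (((p0 :: pr).erase b).map pvF) := by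
          have h1 : ((pvPopMin m rest).1 :: (pvPopMin m rest).2).Perm ((p0 :: pr).map pvF) :=
            (pvPopMin_perm m rest).symm.trans hperm3
          rw [hv] at h1
          have h3 : ((pvF b :: (pvPopMin m rest).2).erase (pvF b)).Perm (((p0 :: pr).map pvF).erase (pvF b)) :=
            h1.erase _
          rw [List.erase_cons_head] at h3
          rw [List.map_erase pvF_inj]
          exact h3
        have hans : (pvPopMin m rest).1.2 = b.2 := by rw [hv]; rfl
        rw [hans]
        exact ih ptr2 _ _ _ hpermNext

-- ===== VERDICT (by name: the statement is the Claim_ definition above) =====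
theorem solution_spec : Claim_equal_solution := by
  intro healths items _ _
  unfold Spec_solution solution solution_alt
  have := pvLoop_sim
    (PySem.List.sorted ((PySem.List.enumerate items 1).map
      (fun p => (((PySem.List.pyGet? p.2 0).getD 0),
                 ((PySem.List.pyGet? p.2 1).getD p.1),
                 ((PySem.List.pyGet? p.2 2).getD p.1))))
      (fun t => t.2.1) false)
    healths 0 [] [] [] (by simp)
  exact this
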